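-- pv_equiv track=rewrite | github.com/prabhashaj/CourseGenerator | lang_news_enhanced.py | _generate_contextual_sources
-- ===== SOURCE A (Python) =====
-- from typing import List, Dict, Any
--
-- def _generate_contextual_sources(query: str) -> List[str]:
--     """Generate relevant sources based on query context"""
--     query_lower = query.lower()
--     sources = []
--
--     # AI/Tech sources
--     if any(term in query_lower for term in ['ai', 'artificial intelligence', 'chatgpt', 'openai', 'google', 'tech', 'microsoft']):
--         sources.extend([
--             "[TechCrunch](https://techcrunch.com) - Technology news and AI developments",
--             "[The Verge](https://theverge.com) - Tech industry coverage",
--             "[MIT Technology Review](https://technologyreview.com) - AI research and analysis",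
--             "[OpenAI Blog](https://openai.com/blog) - Official AI updates"
--         ])
--
--     # News/Current events
--     elif any(term in query_lower for term in ['news', 'breaking', 'current', 'politics', 'world', 'election']):
--         sources.extend([
--             "[Reuters](https://reuters.com) - Global news coverage",
--             "[BBC News](https://bbc.com/news) - International news",
--             "[Associated Press](https://apnews.com) - Breaking news",
--             "[CNN](https://cnn.com) - Latest developments"
--         ])
--
--     # Business/Finance
--     elif any(term in query_lower for term in ['stock', 'market', 'business', 'economy', 'finance', 'company']):
--         sources.extend([
--             "[Bloomberg](https://bloomberg.com) - Financial news",
--             "[Financial Times](https://ft.com) - Business coverage",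
--             "[Wall Street Journal](https://wsj.com) - Market analysis",
--             "[Yahoo Finance](https://finance.yahoo.com) - Stock information"
--         ])
--
--     # Science/Research
--     elif any(term in query_lower for term in ['research', 'study', 'science', 'climate', 'health', 'medicine']):
--         sources.extend([
--             "[Nature](https://nature.com) - Scientific research",
--             "[Science](https://science.org) - Research findings",
--             "[PubMed](https://pubmed.ncbi.nlm.nih.gov) - Medical research",
--             "[Scientific American](https://scientificamerican.com) - Science news"
--         ])
--
--     # Default sources
--     else:
--         sources = [
--             "[Google News](https://news.google.com) - News aggregation",
--             "[Wikipedia](https://wikipedia.org) - General information",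
--             "[Reddit](https://reddit.com) - Community discussions",
--             "[Quora](https://quora.com) - Q&A platform"
--         ]
--
--     return sources[:6]  # Limit to 6 sources
-- ===== SOURCE B (Python) =====
-- from typing import List
--
-- # Index 0..3: category source lists in A's priority order; index 4: default.
-- _SOURCE_TABLES = [
--     [
--         "[TechCrunch](https://techcrunch.com) - Technology news and AI developments",
--         "[The Verge](https://theverge.com) - Tech industry coverage",
--         "[MIT Technology Review](https://technologyreview.com) - AI research and analysis",
--         "[OpenAI Blog](https://openai.com/blog) - Official AI updates",
--     ],
--     [
--         "[Reuters](https://reuters.com) - Global news coverage",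
--         "[BBC News](https://bbc.com/news) - International news",
--         "[Associated Press](https://apnews.com) - Breaking news",
--         "[CNN](https://cnn.com) - Latest developments",
--     ],
--     [
--         "[Bloomberg](https://bloomberg.com) - Financial news",
--         "[Financial Times](https://ft.com) - Business coverage",
--         "[Wall Street Journal](https://wsj.com) - Market analysis",
--         "[Yahoo Finance](https://finance.yahoo.com) - Stock information",
--     ],
--     [
--         "[Nature](https://nature.com) - Scientific research",
--         "[Science](https://science.org) - Research findings",
--         "[PubMed](https://pubmed.ncbi.nlm.nih.gov) - Medical research",
--         "[Scientific American](https://scientificamerican.com) - Science news",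
--     ],
--     [
--         "[Google News](https://news.google.com) - News aggregation",
--         "[Wikipedia](https://wikipedia.org) - General information",
--         "[Reddit](https://reddit.com) - Community discussions",
--         "[Quora](https://quora.com) - Q&A platform",
--     ],
-- ]
--
-- # Keyword -> category index (smaller index = higher priority).
-- _KEYWORD_CAT = {
--     'ai': 0, 'artificial intelligence': 0, 'chatgpt': 0, 'openai': 0,
--     'google': 0, 'tech': 0, 'microsoft': 0,
--     'news': 1, 'breaking': 1, 'current': 1, 'politics': 1, 'world': 1, 'election': 1,
--     'stock': 2, 'market': 2, 'business': 2, 'economy': 2, 'finance': 2, 'company': 2,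
--     'research': 3, 'study': 3, 'science': 3, 'climate': 3, 'health': 3, 'medicine': 3,
-- }
--
-- _KW_LENS = sorted({len(k) for k in _KEYWORD_CAT})
--
--
-- def _generate_contextual_sources(query: str) -> List[str]:
--     """Generate relevant sources based on query context.
--
--     Sliding-window dictionary scan: look every substring of a keyword length
--     up in _KEYWORD_CAT and keep the smallest (highest-priority) category hit;
--     no hit leaves the default index.
--     """
--     q = query.lower()
--     best = len(_SOURCE_TABLES) - 1  # default category
--     for i in range(len(q)):
--         for L in _KW_LENS:
--             cat = _KEYWORD_CAT.get(q[i:i + L])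
--             if cat is not None and cat < best:
--                 best = cat
--     return _SOURCE_TABLES[best][:6]
-- ===== Notes on version B (the rewrite author's own statement) =====
-- stated objective: alternative
-- what changed: Replaced A's per-keyword substring tests (if/elif of any(term in query)) by a sliding-window dictionary scan: every substring of the lowered query whose length is a keyword length is looked up in a keyword-to-category dict built once, keeping the smallest (highest-priority) category index hit; the source table is then indexed by that category.
import Mathlib
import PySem

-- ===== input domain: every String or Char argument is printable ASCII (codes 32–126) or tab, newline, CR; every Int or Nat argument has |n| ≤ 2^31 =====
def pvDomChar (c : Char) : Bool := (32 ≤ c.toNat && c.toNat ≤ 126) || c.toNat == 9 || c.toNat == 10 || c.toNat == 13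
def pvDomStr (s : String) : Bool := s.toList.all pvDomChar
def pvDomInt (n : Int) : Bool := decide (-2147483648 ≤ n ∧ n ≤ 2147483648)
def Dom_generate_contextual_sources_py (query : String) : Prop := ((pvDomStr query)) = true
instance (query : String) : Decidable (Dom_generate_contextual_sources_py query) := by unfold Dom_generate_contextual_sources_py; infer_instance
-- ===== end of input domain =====

-- B replaces A's per-keyword substring tests by a sliding-window dictionary scan of the
-- query (substrings of keyword lengths looked up in a keyword→category dict, minimum
-- category kept); same return value, a different algorithm.

-- ===== PORT A =====
def generate_contextual_sources_py (query : String) : List String :=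
  let query_lower := PySem.Str.lower query
  let sources : List String :=
    if ["ai", "artificial intelligence", "chatgpt", "openai", "google", "tech", "microsoft"].any
        (fun term => PySem.Str.isIn term query_lower) then
      ["[TechCrunch](https://techcrunch.com) - Technology news and AI developments",
       "[The Verge](https://theverge.com) - Tech industry coverage",
       "[MIT Technology Review](https://technologyreview.com) - AI research and analysis",
       "[OpenAI Blog](https://openai.com/blog) - Official AI updates"]
    else if ["news", "breaking", "current", "politics", "world", "election"].any
        (fun term => PySem.Str.isIn term query_lower) then
      ["[Reuters](https://reuters.com) - Global news coverage",
       "[BBC News](https://bbc.com/news) - International news",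
       "[Associated Press](https://apnews.com) - Breaking news",
       "[CNN](https://cnn.com) - Latest developments"]
    else if ["stock", "market", "business", "economy", "finance", "company"].any
        (fun term => PySem.Str.isIn term query_lower) then
      ["[Bloomberg](https://bloomberg.com) - Financial news",
       "[Financial Times](https://ft.com) - Business coverage",
       "[Wall Street Journal](https://wsj.com) - Market analysis",
       "[Yahoo Finance](https://finance.yahoo.com) - Stock information"]
    else if ["research", "study", "science", "climate", "health", "medicine"].any
        (fun term => PySem.Str.isIn term query_lower) then
      ["[Nature](https://nature.com) - Scientific research",
       "[Science](https://science.org) - Research findings",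
       "[PubMed](https://pubmed.ncbi.nlm.nih.gov) - Medical research",
       "[Scientific American](https://scientificamerican.com) - Science news"]
    else
      ["[Google News](https://news.google.com) - News aggregation",
       "[Wikipedia](https://wikipedia.org) - General information",
       "[Reddit](https://reddit.com) - Community discussions",
       "[Quora](https://quora.com) - Q&A platform"]
  PySem.List.slice sources none (some 6)

-- ===== PORT B =====
-- _SOURCE_TABLES: categories 0..3 in priority order, index 4 = default
def pvSourceTables : List (List String) :=
  [["[TechCrunch](https://techcrunch.com) - Technology news and AI developments",
    "[The Verge](https://theverge.com) - Tech industry coverage",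
    "[MIT Technology Review](https://technologyreview.com) - AI research and analysis",
    "[OpenAI Blog](https://openai.com/blog) - Official AI updates"],
   ["[Reuters](https://reuters.com) - Global news coverage",
    "[BBC News](https://bbc.com/news) - International news",
    "[Associated Press](https://apnews.com) - Breaking news",
    "[CNN](https://cnn.com) - Latest developments"],
   ["[Bloomberg](https://bloomberg.com) - Financial news",
    "[Financial Times](https://ft.com) - Business coverage",
    "[Wall Street Journal](https://wsj.com) - Market analysis",
    "[Yahoo Finance](https://finance.yahoo.com) - Stock information"],
   ["[Nature](https://nature.com) - Scientific research",
    "[Science](https://science.org) - Research findings",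
    "[PubMed](https://pubmed.ncbi.nlm.nih.gov) - Medical research",
    "[Scientific American](https://scientificamerican.com) - Science news"],
   ["[Google News](https://news.google.com) - News aggregation",
    "[Wikipedia](https://wikipedia.org) - General information",
    "[Reddit](https://reddit.com) - Community discussions",
    "[Quora](https://quora.com) - Q&A platform"]]

-- _KEYWORD_CAT: the dict literal, in insertion order
def pvKwPairs : List (List Char × Int) :=
  [("ai".toList, 0), ("artificial intelligence".toList, 0), ("chatgpt".toList, 0),
   ("openai".toList, 0), ("google".toList, 0), ("tech".toList, 0), ("microsoft".toList, 0),
   ("news".toList, 1), ("breaking".toList, 1), ("current".toList, 1), ("politics".toList, 1),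
   ("world".toList, 1), ("election".toList, 1),
   ("stock".toList, 2), ("market".toList, 2), ("business".toList, 2), ("economy".toList, 2),
   ("finance".toList, 2), ("company".toList, 2),
   ("research".toList, 3), ("study".toList, 3), ("science".toList, 3), ("climate".toList, 3),
   ("health".toList, 3), ("medicine".toList, 3)]

def pvKwCat : PySem.Dict (List Char) Int := PySem.Dict.mk pvKwPairs

-- _KW_LENS = sorted({len(k) for k in _KEYWORD_CAT})
def pvKwLens : List Int :=
  PySem.List.sorted (PySem.Set.ofList (pvKwPairs.map (fun p => (p.1.length : Int)))) id

-- inner-loop body: cat = _KEYWORD_CAT.get(q[i:i+L]); if cat is not None and cat < best: best = cat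
def pvStep (q : List Char) (best : Int) (i L : Int) : Int :=
  match pvKwCat.get? (PySem.List.slice q (some i) (some (i + L))) with
  | some cat => if cat < best then cat else best
  | none => best

def generate_contextual_sources_py_alt (query : String) : List String :=
  let q := (PySem.Str.lower query).toList
  let best : Int :=
    (PySem.List.pyRange 0 (q.length : Int) 1).foldl
      (fun best i => pvKwLens.foldl (fun best L => pvStep q best i L) best)
      ((pvSourceTables.length : Int) - 1)
  PySem.List.slice (PySem.List.pyGetD pvSourceTables best []) none (some 6)

-- ===== PRECONDITION & SPEC =====
def Spec_generate_contextual_sources_py (query : String) (out : List String) : Prop := out = generate_contextual_sources_py_alt query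
instance (query : String) (out : List String) : Decidable (Spec_generate_contextual_sources_py query out) := by unfold Spec_generate_contextual_sources_py; infer_instance

-- ===== CLAIM =====
def Claim_equal_generate_contextual_sources_py : Prop := ∀ (query : String), Dom_generate_contextual_sources_py query → Spec_generate_contextual_sources_py query (generate_contextual_sources_py query)

-- ===== LEMMAS AND PROOFS =====

-- the inner-loop update as min-with-an-optional-candidate
def pvUpd (b : Int) (o : Option Int) : Int :=
  match o with
  | some c => if c < b then c else b
  | none => b

def pvLk (q : List Char) (p : Int × Int) : Option Int :=
  pvKwCat.get? (PySem.List.slice q (some p.1) (some (p.1 + p.2)))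

def pvBestOf (q : List Char) : Int :=
  (PySem.List.pyRange 0 (q.length : Int) 1).foldl
    (fun best i => pvKwLens.foldl (fun best L => pvStep q best i L) best) 4

def pvHit (q : List Char) (c : Int) : Prop :=
  ∃ kw, (kw, c) ∈ pvKwPairs ∧ PySem.Chars.isIn kw q = true

lemma pvUpd_le (b : Int) (o : Option Int) : pvUpd b o ≤ b := by
  cases o with
  | none => simp [pvUpd]
  | some c => simp only [pvUpd]; split <;> omega

lemma pvFoldMin_spec {β : Type} (g : β → Option Int) (xs : List β) (init : Int) :
    (xs.foldl (fun b x => pvUpd b (g x)) init = init ∨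
      ∃ x ∈ xs, g x = some (xs.foldl (fun b x => pvUpd b (g x)) init)) ∧
    xs.foldl (fun b x => pvUpd b (g x)) init ≤ init ∧
    (∀ x ∈ xs, ∀ c, g x = some c → xs.foldl (fun b x => pvUpd b (g x)) init ≤ c) := by
  induction xs generalizing init with
  | nil => simp
  | cons y ys ih =>
    simp only [List.foldl_cons]
    obtain ⟨ih1, ih2, ih3⟩ := ih (pvUpd init (g y))
    refine ⟨?_, le_trans ih2 (pvUpd_le init (g y)), ?_⟩
    · rcases ih1 with h | h
      · rw [h]
        cases hgy : g y with
        | none => exact Or.inl (by simp [pvUpd])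
        | some c =>
          by_cases hc : c < init
          · exact Or.inr ⟨y, List.mem_cons_self, by simp [pvUpd, hgy, hc]⟩
          · exact Or.inl (by simp [pvUpd, hc])
      · obtain ⟨x, hx, hgx⟩ := h
        exact Or.inr ⟨x, List.mem_cons_of_mem _ hx, hgx⟩
    · intro x hx c hgc
      rcases List.mem_cons.mp hx with rfl | hx'
      · have : pvUpd init (g x) ≤ c := by simp only [pvUpd, hgc]; split <;> omega
        exact le_trans ih2 this
      · exact ih3 x hx' c hgc

lemma pvStep_eq (q : List Char) (b i L : Int) : pvStep q b i L = pvUpd b (pvLk q (i, L)) := rfl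

-- the nested loop is the fold of pvUpd over all (index, length) pairs
lemma pvBestOf_eq_flat (q : List Char) :
    pvBestOf q =
      ((PySem.List.pyRange 0 (q.length : Int) 1).flatMap
          (fun i => pvKwLens.map (Prod.mk i))).foldl (fun b p => pvUpd b (pvLk q p)) 4 := by
  rw [pvBestOf, List.foldl_flatMap]
  simp only [List.foldl_map, pvStep_eq]

set_option maxHeartbeats 2000000 in
lemma pvKwCat_nodup : pvKwCat.keys.Nodup := by decide

-- a dictionary hit on a slice means the keyword occurs in q
set_option maxHeartbeats 2000000 in
lemma pvLookup_hit (q : List Char) (i L c : Int) (hi : 0 ≤ i) (hL : 0 ≤ L)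
    (h : pvLk q (i, L) = some c) : pvHit q c := by
  have hm := (PySem.Dict.get?_eq_some_iff_mem_items pvKwCat _ c pvKwCat_nodup).mp h
  refine ⟨PySem.List.slice q (some i) (some (i + L)), hm, ?_⟩
  rw [PySem.List.slice_toNat q hi (by omega)]
  exact (PySem.Chars.exists_prefix_drop_iff_isIn _ q).mp ⟨i.toNat, List.take_prefix _ _⟩

-- a keyword occurring in q is found by the scan
set_option maxHeartbeats 2000000 in
lemma pvHit_lookup (q : List Char) (c : Int) (h : pvHit q c) :
    ∃ i, (0 ≤ i ∧ i < (q.length : Int)) ∧ ∃ L ∈ pvKwLens, pvLk q (i, L) = some c := by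
  obtain ⟨kw, hmem, hin⟩ := h
  have hne : kw ≠ [] := by
    have hall : ∀ p ∈ pvKwPairs, p.1 ≠ [] := by decide
    exact hall _ hmem
  obtain ⟨j, hpre⟩ := (PySem.Chars.exists_prefix_drop_iff_isIn kw q).mpr hin
  have hj : j < q.length := by
    by_contra hge
    push Not at hge
    rw [List.drop_eq_nil_of_le hge, List.prefix_nil] at hpre
    exact hne hpre
  refine ⟨(j : Int), ⟨by positivity, by exact_mod_cast hj⟩, (kw.length : Int), ?_, ?_⟩
  · have hall : ∀ p ∈ pvKwPairs, ((p.1.length : Int)) ∈ pvKwLens := by decide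
    exact hall _ hmem
  · have hslice : PySem.List.slice q (some (j : Int)) (some ((j : Int) + (kw.length : Int)))
        = kw := by
      rw [PySem.List.slice_toNat q (by positivity) (by positivity)]
      have h1 : ((j : Int) + (kw.length : Int)).toNat - ((j : Int)).toNat = kw.length := by omega
      have h2 : ((j : Int)).toNat = j := by omega
      rw [h1, h2]
      exact (List.prefix_iff_eq_take.mp hpre).symm
    rw [pvLk, hslice]
    exact (PySem.Dict.get?_eq_some_iff_mem_items pvKwCat _ c pvKwCat_nodup).mpr hmem

set_option maxHeartbeats 2000000 in
lemma pvHit_bounds {q : List Char} {c : Int} (h : pvHit q c) : 0 ≤ c ∧ c ≤ 3 := by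
  obtain ⟨kw, hmem, -⟩ := h
  have hall : ∀ p ∈ pvKwPairs, 0 ≤ p.2 ∧ p.2 ≤ 3 := by decide
  exact hall _ hmem

set_option maxHeartbeats 2000000 in
lemma pvBestOf_facts (q : List Char) :
    (pvBestOf q = 4 ∨ pvHit q (pvBestOf q)) ∧ pvBestOf q ≤ 4 ∧
      (∀ c, pvHit q c → pvBestOf q ≤ c) := by
  rw [pvBestOf_eq_flat]
  obtain ⟨h1, h2, h3⟩ := pvFoldMin_spec (pvLk q)
    ((PySem.List.pyRange 0 (q.length : Int) 1).flatMap (fun i => pvKwLens.map (Prod.mk i))) 4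
  refine ⟨?_, h2, ?_⟩
  · rcases h1 with h | ⟨p, hp, hgp⟩
    · exact Or.inl h
    · obtain ⟨i, hi, hpmem⟩ := List.mem_flatMap.mp hp
      obtain ⟨L, hL, rfl⟩ := List.mem_map.mp hpmem
      have hi' := (PySem.List.mem_pyRange_one).mp hi
      have hL' : 0 ≤ L := by
        have hall : ∀ x ∈ pvKwLens, 0 ≤ x := by decide
        exact hall _ hL
      exact Or.inr (pvLookup_hit q i L _ hi'.1 hL' hgp)
  · intro c hc
    obtain ⟨i, ⟨hi0, hilt⟩, L, hL, hlk⟩ := pvHit_lookup q c hc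
    refine h3 (i, L) ?_ c hlk
    exact List.mem_flatMap.mpr ⟨i, (PySem.List.mem_pyRange_one).mpr ⟨hi0, hilt⟩,
      List.mem_map.mpr ⟨L, hL, rfl⟩⟩

-- pvHit at each category index ↔ A's any-test for that category (on List Char)
set_option maxHeartbeats 2000000 in
lemma pvHit0_iff (q : List Char) :
    pvHit q 0 ↔ (["ai", "artificial intelligence", "chatgpt", "openai", "google", "tech",
      "microsoft"].any (fun t => PySem.Chars.isIn t.toList q)) = true := by
  constructor
  · rintro ⟨kw, hmem, hin⟩
    simp only [pvKwPairs, List.mem_cons, List.not_mem_nil, or_false, Prod.mk.injEq] at hmem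
    simp only [List.any_cons, List.any_nil, Bool.or_eq_true]
    rcases hmem with ⟨rfl, -⟩ | ⟨rfl, -⟩ | ⟨rfl, -⟩ | ⟨rfl, -⟩ | ⟨rfl, -⟩ | ⟨rfl, -⟩ | ⟨rfl, -⟩ |
      h | h | h | h | h | h | h | h | h | h | h | h | h | h | h | h | h | h <;> tauto
  · intro h
    simp only [List.any_cons, List.any_nil, Bool.or_eq_true] at h
    rcases h with h | h | h | h | h | h | h | h
    · exact ⟨_, by decide, h⟩
    · exact ⟨_, by decide, h⟩
    · exact ⟨_, by decide, h⟩
    · exact ⟨_, by decide, h⟩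
    · exact ⟨_, by decide, h⟩
    · exact ⟨_, by decide, h⟩
    · exact ⟨_, by decide, h⟩
    · exact absurd h (by decide)

set_option maxHeartbeats 2000000 in
lemma pvHit1_iff (q : List Char) :
    pvHit q 1 ↔ (["news", "breaking", "current", "politics", "world",
      "election"].any (fun t => PySem.Chars.isIn t.toList q)) = true := by
  constructor
  · rintro ⟨kw, hmem, hin⟩
    simp only [pvKwPairs, List.mem_cons, List.not_mem_nil, or_false, Prod.mk.injEq] at hmem
    simp only [List.any_cons, List.any_nil, Bool.or_eq_true]
    rcases hmem with h | h | h | h | h | h | h | ⟨rfl, -⟩ | ⟨rfl, -⟩ | ⟨rfl, -⟩ | ⟨rfl, -⟩ |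
      ⟨rfl, -⟩ | ⟨rfl, -⟩ | h | h | h | h | h | h | h | h | h | h | h | h <;> tauto
  · intro h
    simp only [List.any_cons, List.any_nil, Bool.or_eq_true] at h
    rcases h with h | h | h | h | h | h | h
    · exact ⟨_, by decide, h⟩
    · exact ⟨_, by decide, h⟩
    · exact ⟨_, by decide, h⟩
    · exact ⟨_, by decide, h⟩
    · exact ⟨_, by decide, h⟩
    · exact ⟨_, by decide, h⟩
    · exact absurd h (by decide)

set_option maxHeartbeats 2000000 in
lemma pvHit2_iff (q : List Char) :
    pvHit q 2 ↔ (["stock", "market", "business", "economy", "finance",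
      "company"].any (fun t => PySem.Chars.isIn t.toList q)) = true := by
  constructor
  · rintro ⟨kw, hmem, hin⟩
    simp only [pvKwPairs, List.mem_cons, List.not_mem_nil, or_false, Prod.mk.injEq] at hmem
    simp only [List.any_cons, List.any_nil, Bool.or_eq_true]
    rcases hmem with h | h | h | h | h | h | h | h | h | h | h | h | h | ⟨rfl, -⟩ | ⟨rfl, -⟩ |
      ⟨rfl, -⟩ | ⟨rfl, -⟩ | ⟨rfl, -⟩ | ⟨rfl, -⟩ | h | h | h | h | h | h <;> tauto
  · intro h
    simp only [List.any_cons, List.any_nil, Bool.or_eq_true] at h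
    rcases h with h | h | h | h | h | h | h
    · exact ⟨_, by decide, h⟩
    · exact ⟨_, by decide, h⟩
    · exact ⟨_, by decide, h⟩
    · exact ⟨_, by decide, h⟩
    · exact ⟨_, by decide, h⟩
    · exact ⟨_, by decide, h⟩
    · exact absurd h (by decide)

set_option maxHeartbeats 2000000 in
lemma pvHit3_iff (q : List Char) :
    pvHit q 3 ↔ (["research", "study", "science", "climate", "health",
      "medicine"].any (fun t => PySem.Chars.isIn t.toList q)) = true := by
  constructor
  · rintro ⟨kw, hmem, hin⟩
    simp only [pvKwPairs, List.mem_cons, List.not_mem_nil, or_false, Prod.mk.injEq] at hmem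
    simp only [List.any_cons, List.any_nil, Bool.or_eq_true]
    rcases hmem with h | h | h | h | h | h | h | h | h | h | h | h | h | h | h | h | h | h | h |
      ⟨rfl, -⟩ | ⟨rfl, -⟩ | ⟨rfl, -⟩ | ⟨rfl, -⟩ | ⟨rfl, -⟩ | ⟨rfl, -⟩ <;> tauto
  · intro h
    simp only [List.any_cons, List.any_nil, Bool.or_eq_true] at h
    rcases h with h | h | h | h | h | h | h
    · exact ⟨_, by decide, h⟩
    · exact ⟨_, by decide, h⟩
    · exact ⟨_, by decide, h⟩
    · exact ⟨_, by decide, h⟩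
    · exact ⟨_, by decide, h⟩
    · exact ⟨_, by decide, h⟩
    · exact absurd h (by decide)

lemma pvMain (query : String) :
    generate_contextual_sources_py query = generate_contextual_sources_py_alt query := by
  unfold generate_contextual_sources_py generate_contextual_sources_py_alt
  dsimp only
  have halt : ∀ (q : List Char),
      (PySem.List.pyRange 0 (q.length : Int) 1).foldl
        (fun best i => pvKwLens.foldl (fun best L => pvStep q best i L) best)
        ((pvSourceTables.length : Int) - 1) = pvBestOf q := by
    intro q; rfl
  rw [halt]
  set ql := PySem.Str.lower query with hql
  set q : List Char := ql.toList with hq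
  obtain ⟨H1, H2, H3⟩ := pvBestOf_facts q
  have hge : 0 ≤ pvBestOf q := by
    rcases H1 with h | h
    · omega
    · exact (pvHit_bounds h).1
  have hbridge : ∀ (ts : List String),
      (ts.any (fun term => PySem.Str.isIn term ql)) =
        (ts.any (fun t => PySem.Chars.isIn t.toList q)) := by
    intro ts
    simp only [PySem.Str.isIn_eq, hq]
  by_cases c0 : (["ai", "artificial intelligence", "chatgpt", "openai", "google", "tech",
      "microsoft"].any (fun term => PySem.Str.isIn term ql)) = true
  · have hit0 : pvHit q 0 := (pvHit0_iff q).mpr (by rw [← hbridge]; exact c0)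
    have : pvBestOf q = 0 := le_antisymm (H3 0 hit0) hge
    rw [this, if_pos c0]
    rfl
  · have nh0 : ¬ pvHit q 0 := fun h => c0 (by rw [hbridge]; exact (pvHit0_iff q).mp h)
    rw [if_neg c0]
    by_cases c1 : (["news", "breaking", "current", "politics", "world",
        "election"].any (fun term => PySem.Str.isIn term ql)) = true
    · have hit1 : pvHit q 1 := (pvHit1_iff q).mpr (by rw [← hbridge]; exact c1)
      have hne0 : pvBestOf q ≠ 0 := by
        intro h
        rcases H1 with h4 | hh
        · omega
        · rw [h] at hh; exact nh0 hh
      have : pvBestOf q = 1 := le_antisymm (H3 1 hit1) (by omega)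
      rw [this, if_pos c1]
      rfl
    · have nh1 : ¬ pvHit q 1 := fun h => c1 (by rw [hbridge]; exact (pvHit1_iff q).mp h)
      rw [if_neg c1]
      by_cases c2 : (["stock", "market", "business", "economy", "finance",
          "company"].any (fun term => PySem.Str.isIn term ql)) = true
      · have hit2 : pvHit q 2 := (pvHit2_iff q).mpr (by rw [← hbridge]; exact c2)
        have hne : pvBestOf q ≠ 0 ∧ pvBestOf q ≠ 1 := by
          constructor <;> intro h <;> rcases H1 with h4 | hh
          · omega
          · rw [h] at hh; exact nh0 hh
          · omega
          · rw [h] at hh; exact nh1 hh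
        have : pvBestOf q = 2 := le_antisymm (H3 2 hit2) (by omega)
        rw [this, if_pos c2]
        rfl
      · have nh2 : ¬ pvHit q 2 := fun h => c2 (by rw [hbridge]; exact (pvHit2_iff q).mp h)
        rw [if_neg c2]
        by_cases c3 : (["research", "study", "science", "climate", "health",
            "medicine"].any (fun term => PySem.Str.isIn term ql)) = true
        · have hit3 : pvHit q 3 := (pvHit3_iff q).mpr (by rw [← hbridge]; exact c3)
          have hne : pvBestOf q ≠ 0 ∧ pvBestOf q ≠ 1 ∧ pvBestOf q ≠ 2 := by
            refine ⟨?_, ?_, ?_⟩ <;> intro h <;> rcases H1 with h4 | hh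
            · omega
            · rw [h] at hh; exact nh0 hh
            · omega
            · rw [h] at hh; exact nh1 hh
            · omega
            · rw [h] at hh; exact nh2 hh
          have : pvBestOf q = 3 := le_antisymm (H3 3 hit3) (by omega)
          rw [this, if_pos c3]
          rfl
        · have nh3 : ¬ pvHit q 3 := fun h => c3 (by rw [hbridge]; exact (pvHit3_iff q).mp h)
          rw [if_neg c3]
          have : pvBestOf q = 4 := by
            rcases H1 with h4 | hh
            · exact h4
            · obtain ⟨hb0, hb3⟩ := pvHit_bounds hh
              have : pvBestOf q = 0 ∨ pvBestOf q = 1 ∨ pvBestOf q = 2 ∨ pvBestOf q = 3 := by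
                omega
              rcases this with h | h | h | h <;> rw [h] at hh
              · exact absurd hh nh0
              · exact absurd hh nh1
              · exact absurd hh nh2
              · exact absurd hh nh3
          rw [this]
          rfl

-- ===== VERDICT =====
theorem generate_contextual_sources_py_spec : Claim_equal_generate_contextual_sources_py := by
  intro query _
  exact pvMain query
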